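-- pv_equiv track=rewrite | github.com/danieleschmidt/HE-Graph-Embeddings | scripts/code_quality_enhancer.py | enhance_docstrings
-- ===== SOURCE A (Python) =====
-- def enhance_docstrings(content: str) -> str:
--     """Add missing docstrings to functions and classes"""
--     lines = content.split('\n')
--     new_lines = []
--     i = 0
--
--     while i < len(lines):
--         line = lines[i]
--         new_lines.append(line)
--
--         # Check for function/class definitions without docstrings
--         if (line.strip().startswith('def ') or line.strip().startswith('class ')) and ':' in line:
--             # Look ahead to see if there's already a docstring
--             j = i + 1
--             has_docstring = False
--
--             while j < len(lines) and (lines[j].strip() == '' or lines[j].strip().startswith('#')):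
--                 j += 1
--
--             if j < len(lines) and ('"""' in lines[j] or "'''" in lines[j]):
--                 has_docstring = True
--
--             if not has_docstring:
--                 # Add basic docstring
--                 indent = len(line) - len(line.lstrip())
--                 if line.strip().startswith('def '):
--                     func_name = line.split('def ')[1].split('(')[0]
--                     docstring = f'{" " * (indent + 4)}"""{func_name.replace("_", " ").title()}."""'
--                 else:
--                     class_name = line.split('class ')[1].split('(')[0].split(':')[0]
--                     docstring = f'{" " * (indent + 4)}"""{class_name} class."""'
--
--                 new_lines.append(docstring)
--
--         i += 1
--
--     return '\n'.join(new_lines)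
-- ===== SOURCE B (Python) =====
-- def enhance_docstrings(content: str) -> str:
--     """Add missing docstrings to functions and classes"""
--     lines = content.split('\n')
--     out = []
--     follower = None  # first non-blank/non-comment line strictly below the current one
--     for line in reversed(lines):
--         s = line.strip()
--         if (s.startswith('def ') or s.startswith('class ')) and ':' in line:
--             if follower is None or ('"""' not in follower and "'''" not in follower):
--                 out.append(_default_doc(line, s))
--         out.append(line)
--         if not (s == '' or s.startswith('#')):
--             follower = line
--     out.reverse()
--     return '\n'.join(out)
--
--
-- def _default_doc(line, s):
--     pad = ' ' * (len(line) - len(line.lstrip()) + 4)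
--     if s.startswith('def '):
--         body = line.split('def ')[1].split('(')[0].replace('_', ' ').title() + '.'
--     else:
--         body = line.split('class ')[1].split('(')[0].split(':')[0] + ' class.'
--     return pad + '"""' + body + '"""'
-- ===== Notes on version B (the rewrite author's own statement) =====
-- stated objective: alternative
-- what changed: A scans forward and, at every def/class line, runs an inner look-ahead loop past blank/comment lines; B is a single backward pass that carries the most recent content line seen so far in one variable, so the docstring decision is a constant-time test per line and there is no inner loop.
import Mathlib
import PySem

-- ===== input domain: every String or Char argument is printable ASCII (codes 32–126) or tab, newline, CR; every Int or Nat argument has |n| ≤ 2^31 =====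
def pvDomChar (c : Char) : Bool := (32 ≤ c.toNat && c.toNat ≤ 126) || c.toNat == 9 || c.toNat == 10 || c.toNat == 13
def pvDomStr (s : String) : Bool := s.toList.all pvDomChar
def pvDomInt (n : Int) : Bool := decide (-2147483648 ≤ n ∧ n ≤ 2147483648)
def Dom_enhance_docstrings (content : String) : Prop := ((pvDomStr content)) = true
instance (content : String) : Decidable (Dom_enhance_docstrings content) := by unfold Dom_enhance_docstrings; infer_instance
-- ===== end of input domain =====

-- B replaces A's forward scan with an inner look-ahead loop by a single backward pass
-- that carries the nearest content line below as a variable; return values proved equal.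

-- shared ASCII str.title machinery (exact on the ASCII domain Dom_); used by both ports
def pvIsAlphaA (c : Char) : Bool := (65 ≤ c.toNat && c.toNat ≤ 90) || (97 ≤ c.toNat && c.toNat ≤ 122)
def pvUpA (c : Char) : Char := if 97 ≤ c.toNat ∧ c.toNat ≤ 122 then Char.ofNat (c.toNat - 32) else c
def pvLowA (c : Char) : Char := if 65 ≤ c.toNat ∧ c.toNat ≤ 90 then Char.ofNat (c.toNat + 32) else c
def pvTitleAux : Bool → List Char → List Char
  | _, [] => []
  | prevCased, c :: cs =>
    if pvIsAlphaA c then (if prevCased then pvLowA c else pvUpA c) :: pvTitleAux true cs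
    else c :: pvTitleAux false cs
-- str.title(), exact for ASCII input (Dom_ admits only ASCII)
def pvTitle (s : String) : String := String.ofList (pvTitleAux false s.toList)

-- ===== PORT A =====
def pvIsDefClass (line : String) : Bool :=
  (PySem.Str.startswith (PySem.Str.strip line) "def " ||
   PySem.Str.startswith (PySem.Str.strip line) "class ") && PySem.Str.isIn ":" line
def pvTriples (l : String) : Bool := PySem.Str.isIn "\"\"\"" l || PySem.Str.isIn "'''" l
def pvBlankOrComment (l : String) : Bool :=
  (PySem.Str.strip l == "") || PySem.Str.startswith (PySem.Str.strip l) "#"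

-- the docstring A builds for an undocumented def/class line
-- (the .getD fallbacks are unreachable: the guard pvIsDefClass guarantees the split pieces exist)
def pvMkDoc (line : String) : String :=
  let indent := line.toList.length - (PySem.Str.lstrip line).toList.length
  let pad := String.ofList (List.replicate (indent + 4) ' ')
  if PySem.Str.startswith (PySem.Str.strip line) "def " then
    let name := (((PySem.Str.split? (((PySem.Str.split? line "def ").getD []).getD 1 "") "(").getD []).getD 0 "")
    pad ++ "\"\"\"" ++ pvTitle (PySem.Str.replace name "_" " ") ++ ".\"\"\""
  else
    let name := (((PySem.Str.split?
        (((PySem.Str.split? (((PySem.Str.split? line "class ").getD []).getD 1 "") "(").getD []).getD 0 "") ":").getD []).getD 0 "")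
    pad ++ "\"\"\"" ++ name ++ " class.\"\"\""

-- A's inner 'while j < len(lines)' look-ahead over the suffix after the def/class line
def pvLookA : List String → Bool
  | [] => false
  | l :: ls => if pvBlankOrComment l then pvLookA ls else pvTriples l

-- A's outer 'while i < len(lines)' loop
def pvGoA : List String → List String
  | [] => []
  | line :: rest =>
    let tail := pvGoA rest
    if pvIsDefClass line then
      if pvLookA rest then line :: tail else line :: pvMkDoc line :: tail
    else line :: tail

def enhance_docstrings (content : String) : String :=
  PySem.Str.join "\n" (pvGoA ((PySem.Str.split? content "\n").getD []))

-- ===== PORT B =====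
-- B's _default_doc(line, s): the body text is built first, then wrapped once
def pvDocB (line s : String) : String :=
  let pad := String.ofList (List.replicate
      (line.toList.length - (PySem.Str.lstrip line).toList.length + 4) ' ')
  let body :=
    if PySem.Str.startswith s "def " then
      pvTitle (PySem.Str.replace
        (((PySem.Str.split? (((PySem.Str.split? line "def ").getD []).getD 1 "") "(").getD []).getD 0 "")
        "_" " ") ++ "."
    else
      (((PySem.Str.split?
        (((PySem.Str.split? (((PySem.Str.split? line "class ").getD []).getD 1 "") "(").getD []).getD 0 "")
        ":").getD []).getD 0 "") ++ " class."
  pad ++ "\"\"\"" ++ body ++ "\"\"\""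

-- one iteration of B's 'for line in reversed(lines)' loop; state = (follower, out)
def pvStepB (st : Option String × List String) (line : String) : Option String × List String :=
  let s := PySem.Str.strip line
  let out :=
    if (PySem.Str.startswith s "def " || PySem.Str.startswith s "class ")
        && PySem.Str.isIn ":" line then
      if (match st.1 with
          | none => true
          | some f => !(PySem.Str.isIn "\"\"\"" f || PySem.Str.isIn "'''" f)) then
        st.2 ++ [pvDocB line s]
      else st.2
    else st.2
  let out2 := out ++ [line]
  let fol := if (s == "") || PySem.Str.startswith s "#" then st.1 else some line
  (fol, out2)

def enhance_docstrings_alt (content : String) : String :=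
  PySem.Str.join "\n"
    (((((PySem.Str.split? content "\n").getD []).reverse.foldl pvStepB (none, [])).2).reverse)

-- ===== PRECONDITION & SPEC =====
def Spec_enhance_docstrings (content : String) (out : String) : Prop := out = enhance_docstrings_alt content
instance (content : String) (out : String) : Decidable (Spec_enhance_docstrings content out) := by unfold Spec_enhance_docstrings; infer_instance

-- ===== CLAIM (what is proved, stated in full; the proofs are below) =====
def Claim_equal_enhance_docstrings : Prop := ∀ (content : String), Dom_enhance_docstrings content → Spec_enhance_docstrings content (enhance_docstrings content)

-- ===== LEMMAS AND PROOFS =====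

-- proof-only helpers: the first non-blank/non-comment line of ls, else the carried f
def pvNC : List String → Option String → Option String
  | [], f => f
  | l :: ls, f => if pvBlankOrComment l then pvNC ls f else some l

def pvNeeds : Option String → Bool
  | none => true
  | some f => !(pvTriples f)

-- reference form of the output that B's backward fold produces on the suffix ls
def pvGaB : List String → Option String → List String
  | [], _ => []
  | line :: rest, f =>
    let tail := pvGaB rest f
    if pvIsDefClass line then
      if pvNeeds (pvNC rest f) then line :: pvDocB line (PySem.Str.strip line) :: tail
      else line :: tail
    else line :: tail

theorem pvLookA_eq (ls : List String) : pvLookA ls = !(pvNeeds (pvNC ls none)) := by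
  induction ls with
  | nil => rfl
  | cons l ls ih =>
    by_cases h : pvBlankOrComment l = true
    · simpa [pvLookA, pvNC, h] using ih
    · simp [pvLookA, pvNC, h, pvNeeds]

theorem pvDoc_eq (line : String) : pvMkDoc line = pvDocB line (PySem.Str.strip line) := by
  have hq : ("." : String) ++ "\"\"\"" = ".\"\"\"" := by decide
  have hc : (" class." : String) ++ "\"\"\"" = " class.\"\"\"" := by decide
  unfold pvMkDoc pvDocB
  by_cases h : PySem.Str.startswith (PySem.Str.strip line) "def " = true <;>
    simp only [h, if_true, if_false, Bool.false_eq_true, String.append_assoc, hq, hc]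

theorem pvCond1 (line : String) :
    ((PySem.Str.startswith (PySem.Str.strip line) "def "
      || PySem.Str.startswith (PySem.Str.strip line) "class ")
      && PySem.Str.isIn ":" line) = pvIsDefClass line := rfl

theorem pvCond2 (line : String) :
    ((PySem.Str.strip line == "") || PySem.Str.startswith (PySem.Str.strip line) "#")
      = pvBlankOrComment line := rfl

theorem pvCond3 (o : Option String) :
    (match o with
      | none => true
      | some f => !(PySem.Str.isIn "\"\"\"" f || PySem.Str.isIn "'''" f)) = pvNeeds o := by
  cases o <;> rfl

-- B's backward fold over a suffix, characterised: it yields the next-content line and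
-- appends the (reversed) reference output of that suffix
theorem pvFoldB (ls : List String) (f0 : Option String) (out0 : List String) :
    ls.foldr (fun line st => pvStepB st line) (f0, out0)
      = (pvNC ls f0, out0 ++ (pvGaB ls f0).reverse) := by
  induction ls with
  | nil => simp [pvNC, pvGaB]
  | cons line rest ih =>
    rw [List.foldr_cons, ih]
    simp only [pvStepB, pvCond1, pvCond2, pvCond3, pvNC, pvGaB]
    by_cases hd : pvIsDefClass line = true <;>
      by_cases hn : pvNeeds (pvNC rest f0) = true <;>
        by_cases hb : pvBlankOrComment line = true <;>
          simp [hd, hn, hb, List.append_assoc]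

theorem pvGoA_eq (ls : List String) : pvGoA ls = pvGaB ls none := by
  induction ls with
  | nil => rfl
  | cons line rest ih =>
    simp only [pvGoA, pvGaB, ih, pvLookA_eq, pvDoc_eq]
    by_cases hd : pvIsDefClass line = true
    · by_cases hn : pvNeeds (pvNC rest none) = true <;> simp [hd, hn]
    · simp [hd]

-- ===== VERDICT (by name: the statement is the Claim_ definition above) =====
theorem enhance_docstrings_spec : Claim_equal_enhance_docstrings := by
  intro content _
  unfold Spec_enhance_docstrings enhance_docstrings enhance_docstrings_alt
  rw [List.foldl_reverse]
  simp only [pvFoldB, List.nil_append, List.reverse_reverse, pvGoA_eq]
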